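-- pv_equiv track=rewrite | github.com/milavdabgar/milav-next | ai_voiceover_system/glados/parsers/slidev.py | _split_content_robust
-- ===== SOURCE A (Python) =====
-- def _split_content_robust(content):
--     """Split content by '---' separators, skipping those in code blocks."""
--     lines = content.split('\n')
--     sections = []
--     current_section = []
--     in_code_block = False
--
--     for i, line in enumerate(lines):
--         stripped = line.strip()
--         if stripped.startswith('```'):
--             in_code_block = not in_code_block
--
--         is_separator = (stripped == '---' and not in_code_block)
--
--         if is_separator:
--             if current_section:
--                 sections.append('\n'.join(current_section))
--             else:
--                 sections.append('')
--             current_section = []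
--         elif i == len(lines) - 1:
--             current_section.append(line)
--             sections.append('\n'.join(current_section))
--         else:
--             current_section.append(line)
--
--     return sections
-- ===== SOURCE B (Python) =====
-- def _split_content_robust(content):
--     """Split content by '---' separators, skipping those in code blocks."""
--     lines = content.split('\n')
--     # Pass 1: collect indices of separator lines.
--     seps = []
--     in_code = False
--     for i, line in enumerate(lines):
--         s = line.strip()
--         if s.startswith('```'):
--             in_code = not in_code
--         if s == '---' and not in_code:
--             seps.append(i)
--     # Pass 2: sections are the joined slices between consecutive separators.
--     sections = []
--     prev = -1
--     for sep in seps: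
--         sections.append('\n'.join(lines[prev + 1:sep]))
--         prev = sep
--     if prev != len(lines) - 1:
--         sections.append('\n'.join(lines[prev + 1:]))
--     return sections
-- ===== Notes on version B (the rewrite author's own statement) =====
-- stated objective: alternative
-- what changed: A builds sections in one stateful loop that accumulates the current section line-by-line and special-cases the last line; B first collects the indices of separator lines in one scan and then emits each section as the joined slice of lines between consecutive separators.
import Mathlib
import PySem

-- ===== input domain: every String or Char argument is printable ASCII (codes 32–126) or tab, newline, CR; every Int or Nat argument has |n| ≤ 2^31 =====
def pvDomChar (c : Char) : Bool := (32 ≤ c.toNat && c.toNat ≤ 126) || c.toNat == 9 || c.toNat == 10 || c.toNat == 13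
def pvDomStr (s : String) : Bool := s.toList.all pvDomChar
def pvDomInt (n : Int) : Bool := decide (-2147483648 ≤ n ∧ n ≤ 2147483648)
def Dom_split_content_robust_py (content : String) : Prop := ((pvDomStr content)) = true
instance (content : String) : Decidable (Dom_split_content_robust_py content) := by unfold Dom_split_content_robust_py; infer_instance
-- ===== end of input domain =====

-- B replaces A's single stateful loop by a scan that collects separator indices and
-- then emits the sections as joined slices between consecutive separators (objective: alternative decomposition).

-- ===== PORT A =====
-- content.split('\n'); exact: Python str.split(sep) with the non-empty separator '\n' (PySem.Chars.splitOn)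
def pvSplitLines (content : String) : List String :=
  (PySem.Chars.splitOn content.toList ['\n']).map String.ofList

-- one iteration of A's loop: state (sections, current_section, in_code_block), element (i, line); n = len(lines)
def pvStepA (n : Int) (st : List String × List String × Bool) (p : Int × String) :
    List String × List String × Bool :=
  let stripped := PySem.Str.strip p.2
  let inCode := if PySem.Str.startswith stripped "```" then !st.2.2 else st.2.2
  let isSep := stripped == "---" && !inCode
  if isSep then
    (st.1 ++ [if st.2.1 ≠ [] then PySem.Str.join "\n" st.2.1 else ""], [], inCode)
  else if p.1 == n - 1 then
    (st.1 ++ [PySem.Str.join "\n" (st.2.1 ++ [p.2])], st.2.1 ++ [p.2], inCode)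
  else
    (st.1, st.2.1 ++ [p.2], inCode)

def split_content_robust_py (content : String) : List String :=
  let lines := pvSplitLines content
  ((PySem.List.enumerate lines 0).foldl (pvStepA (lines.length : Int)) ([], [], false)).1

-- ===== PORT B =====
-- pass 1 step: state (seps, in_code), element (i, line)
def pvStepB1 (st : List Int × Bool) (p : Int × String) : List Int × Bool :=
  let s := PySem.Str.strip p.2
  let inCode := if PySem.Str.startswith s "```" then !st.2 else st.2
  (if s == "---" && !inCode then st.1 ++ [p.1] else st.1, inCode)

-- pass 2 step: state (sections, prev), element sep
def pvStepB2 (lines : List String) (st : List String × Int) (sep : Int) : List String × Int :=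
  (st.1 ++ [PySem.Str.join "\n" (PySem.List.slice lines (some (st.2 + 1)) (some sep))], sep)

def split_content_robust_py_alt (content : String) : List String :=
  let lines := pvSplitLines content
  let seps := ((PySem.List.enumerate lines 0).foldl pvStepB1 ([], false)).1
  let r := seps.foldl (pvStepB2 lines) ([], -1)
  if r.2 = (lines.length : Int) - 1 then r.1
  else r.1 ++ [PySem.Str.join "\n" (PySem.List.slice lines (some (r.2 + 1)) none)]

-- ===== PRECONDITION & SPEC =====
def Spec_split_content_robust_py (content : String) (out : List String) : Prop := out = split_content_robust_py_alt content
instance (content : String) (out : List String) : Decidable (Spec_split_content_robust_py content out) := by unfold Spec_split_content_robust_py; infer_instance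

-- ===== CLAIM (what is proved, stated in full; the proofs are below) =====
def Claim_equal_split_content_robust_py : Prop := ∀ (content : String), Dom_split_content_robust_py content → Spec_split_content_robust_py content (split_content_robust_py content)

-- ===== LEMMAS AND PROOFS =====

-- reference recursion: the sections A produces from pending section `cur`, remaining lines, code-block flag
def gSec : List String → List String → Bool → List String
  | _, [], _ => []
  | cur, l :: rest, ic =>
    let st := PySem.Str.strip l
    let ic' := if PySem.Str.startswith st "```" then !ic else ic
    if st == "---" && !ic' then
      PySem.Str.join "\n" cur :: gSec [] rest ic'
    else
      match rest with
      | [] => [PySem.Str.join "\n" (cur ++ [l])]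
      | _ :: _ => gSec (cur ++ [l]) rest ic'

-- recursive form of B's first pass
def sepsRec : List String → Int → Bool → List Int
  | [], _, _ => []
  | l :: rest, s, ic =>
    let st := PySem.Str.strip l
    let ic' := if PySem.Str.startswith st "```" then !ic else ic
    if st == "---" && !ic' then s :: sepsRec rest (s + 1) ic'
    else sepsRec rest (s + 1) ic'

-- recursive form of B's second pass (including the trailing section)
def buildFrom (lines : List String) : Int → List Int → List String
  | prev, [] =>
    if prev = (lines.length : Int) - 1 then []
    else [PySem.Str.join "\n" (PySem.List.slice lines (some (prev + 1)) none)]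
  | prev, sep :: rest =>
    PySem.Str.join "\n" (PySem.List.slice lines (some (prev + 1)) (some sep)) :: buildFrom lines sep rest

lemma join_nil_str : PySem.Str.join "\n" [] = "" := rfl

lemma A_fold (n : Int) (rest : List String) (s : Int) (secs cur : List String) (ic : Bool)
    (h : s + rest.length = n) :
    ((PySem.List.enumerate rest s).foldl (pvStepA n) (secs, cur, ic)).1 = secs ++ gSec cur rest ic := by
  induction rest generalizing s secs cur ic with
  | nil => simp [PySem.List.enumerate_nil, gSec]
  | cons l t IH =>
    rw [PySem.List.enumerate_cons]
    simp only [List.foldl_cons]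
    cases hsep : (PySem.Str.strip l == "---" &&
        !(if PySem.Str.startswith (PySem.Str.strip l) "```" then !ic else ic)) with
    | true =>
      have hstep : pvStepA n (secs, cur, ic) (s, l) =
          (secs ++ [PySem.Str.join "\n" cur], [],
           if PySem.Str.startswith (PySem.Str.strip l) "```" then !ic else ic) := by
        simp only [pvStepA, hsep, if_true]
        by_cases hc : cur = [] <;> simp [hc, join_nil_str]
      rw [hstep, IH (s + 1) _ _ _ (by simp at h ⊢; omega)]
      simp only [gSec, hsep, if_true, List.append_assoc, List.cons_append, List.nil_append]
    | false =>
      cases t with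
      | nil =>
        have hlast : ((s : Int) == n - 1) = true := by
          simp at h; simp; omega
        have hstep : pvStepA n (secs, cur, ic) (s, l) =
            (secs ++ [PySem.Str.join "\n" (cur ++ [l])], cur ++ [l],
             if PySem.Str.startswith (PySem.Str.strip l) "```" then !ic else ic) := by
          simp only [pvStepA, hsep, hlast, Bool.false_eq_true, if_false, if_true]
        rw [hstep]
        simp only [PySem.List.enumerate_nil, List.foldl_nil, gSec, hsep,
          Bool.false_eq_true, if_false]
      | cons l2 t2 =>
        have hlast : ((s : Int) == n - 1) = false := by
          simp at h; simp; omega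
        have hstep : pvStepA n (secs, cur, ic) (s, l) =
            (secs, cur ++ [l],
             if PySem.Str.startswith (PySem.Str.strip l) "```" then !ic else ic) := by
          simp only [pvStepA, hsep, hlast, Bool.false_eq_true, if_false]
        rw [hstep, IH (s + 1) _ _ _ (by simp at h ⊢; omega)]
        simp only [gSec, hsep, Bool.false_eq_true, if_false]

lemma B1_fold (rest : List String) (s : Int) (acc : List Int) (ic : Bool) :
    ((PySem.List.enumerate rest s).foldl pvStepB1 (acc, ic)).1 = acc ++ sepsRec rest s ic := by
  induction rest generalizing s acc ic with
  | nil => simp [PySem.List.enumerate_nil, sepsRec]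
  | cons l t IH =>
    rw [PySem.List.enumerate_cons]
    simp only [List.foldl_cons, pvStepB1]
    cases hsep : (PySem.Str.strip l == "---" &&
        !(if PySem.Str.startswith (PySem.Str.strip l) "```" then !ic else ic)) with
    | true =>
      simp only [if_true]
      rw [IH]
      simp only [sepsRec, hsep, if_true]
      simp
    | false =>
      simp only [Bool.false_eq_true, if_false]
      rw [IH]
      simp only [sepsRec, hsep, Bool.false_eq_true, if_false]

lemma B2_fold (lines : List String) (seps : List Int) (secs : List String) (prev : Int) :
    (if (seps.foldl (pvStepB2 lines) (secs, prev)).2 = (lines.length : Int) - 1 then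
        (seps.foldl (pvStepB2 lines) (secs, prev)).1
      else (seps.foldl (pvStepB2 lines) (secs, prev)).1 ++
        [PySem.Str.join "\n" (PySem.List.slice lines
          (some ((seps.foldl (pvStepB2 lines) (secs, prev)).2 + 1)) none)])
      = secs ++ buildFrom lines prev seps := by
  induction seps generalizing secs prev with
  | nil =>
    simp only [List.foldl_nil, buildFrom]
    by_cases h : prev = (lines.length : Int) - 1 <;> simp [h]
  | cons sep rest IH =>
    simp only [List.foldl_cons, pvStepB2, buildFrom]
    rw [IH]
    simp

lemma drop_ne_nil_lt {α : Type} (lines : List α) (s : Nat) (l : α) (t : List α)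
    (h : lines.drop s = l :: t) : s < lines.length := by
  by_contra hc
  rw [List.drop_eq_nil_of_le (by omega)] at h
  simp at h

lemma main_merge (rest : List String) (lines : List String) (p s : Nat) (ic : Bool)
    (hne : rest ≠ []) (hdrop : rest = lines.drop s) (hp : p ≤ s) :
    buildFrom lines ((p : Int) - 1) (sepsRec rest (s : Int) ic)
      = gSec ((lines.drop p).take (s - p)) rest ic := by
  induction rest generalizing p s ic with
  | nil => exact absurd rfl hne
  | cons l t IH =>
    have hs : s < lines.length := drop_ne_nil_lt lines s l t hdrop.symm
    have hgl : lines[s]? = some l := by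
      rw [← List.head?_drop, ← hdrop]; rfl
    have hdt : t = lines.drop (s + 1) := by
      have h0 : lines.drop (s + 1) = (lines.drop s).drop 1 := by
        rw [List.drop_drop]
      rw [h0, ← hdrop]; rfl
    set ic' := if PySem.Str.startswith (PySem.Str.strip l) "```" then !ic else ic with hic
    have hpc : (p : Int) - 1 + 1 = (p : Int) := by omega
    cases hsep : (PySem.Str.strip l == "---" && !ic') with
    | true =>
      -- separator line
      simp only [sepsRec, gSec, ← hic, hsep, if_true]
      have hslice : PySem.List.slice lines (some ((p : Int) - 1 + 1)) (some (s : Int))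
          = (lines.drop p).take (s - p) := by
        rw [hpc, PySem.List.slice_natCast]
      cases t with
      | nil =>
        simp only [sepsRec, buildFrom, hslice]
        have hsn : (s : Int) = (lines.length : Int) - 1 := by
          have h1 := congrArg List.length hdrop
          simp [List.length_drop] at h1
          omega
        simp [hsn, gSec]
      | cons l2 t2 =>
        simp only [buildFrom, hslice]
        have h2 := IH (s + 1) (s + 1) ic' (by simp) hdt (le_refl _)
        push_cast at h2
        norm_num at h2
        rw [h2]
    | false =>
      -- not a separator line
      simp only [sepsRec, gSec, ← hic, hsep, Bool.false_eq_true, if_false]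
      have hcurl : (lines.drop p).take (s - p) ++ [l] = (lines.drop p).take (s + 1 - p) := by
        have h1 : s + 1 - p = (s - p) + 1 := by omega
        rw [h1, List.take_add_one]
        have h2 : (lines.drop p)[s - p]? = some l := by
          rw [List.getElem?_drop]
          have h3 : p + (s - p) = s := by omega
          rw [h3, hgl]
        rw [h2]; rfl
      cases t with
      | nil =>
        have h1 : lines.length - s = 1 := by
          have h0 := congrArg List.length hdrop
          simp [List.length_drop] at h0
          omega
        simp only [sepsRec, buildFrom]
        have hne2 : ¬ ((p : Int) - 1 = (lines.length : Int) - 1) := by omega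
        simp only [hne2, if_false]
        have hslice : PySem.List.slice lines (some ((p : Int) - 1 + 1)) none = lines.drop p := by
          rw [hpc, PySem.List.slice_from_natCast]
        rw [hslice]
        have hall : lines.drop p = (lines.drop p).take (s - p) ++ [l] := by
          rw [hcurl]
          have h2 : (lines.drop p).length ≤ s + 1 - p := by
            simp [List.length_drop]; omega
          rw [List.take_of_length_le h2]
        conv_lhs => rw [hall]
      | cons l2 t2 =>
        have h2 := IH p (s + 1) ic' (by simp) hdt (by omega)
        push_cast at h2
        rw [h2, hcurl]

-- ===== VERDICT (by name: the statement is the Claim_ definition above) =====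
theorem split_content_robust_py_spec : Claim_equal_split_content_robust_py := by
  intro content _
  unfold Spec_split_content_robust_py
  simp only [split_content_robust_py, split_content_robust_py_alt]
  rw [A_fold ((pvSplitLines content).length : Int) (pvSplitLines content) 0 [] [] false (by simp)]
  rw [B1_fold (pvSplitLines content) 0 [] false]
  simp only [List.nil_append]
  rw [B2_fold (pvSplitLines content) (sepsRec (pvSplitLines content) 0 false) [] (-1)]
  simp only [List.nil_append]
  cases hc : pvSplitLines content with
  | nil => simp [sepsRec, buildFrom, gSec]
  | cons l t =>
    have h2 := main_merge (l :: t) (l :: t) 0 0 false (by simp) rfl (le_refl _)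
    norm_num at h2
    exact h2.symm
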